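-- pv_equiv track=rewrite | github.com/daniil-777/Algorithms | ysda/forgotten_password/forgotten_password.py | generate_passwords
-- ===== SOURCE A (Python) =====
-- from typing import List
-- import itertools
--
-- def generate_passwords(words: str) -> List[str]:
--     result = []
--     a = words.split()
--     q = len(a) + 1
--     for j in range(1, q):
--         for item in list(itertools.permutations(a, j)):
--             s = ''.join(item)
--             result.append(s)
--     result.sort()
--     return result
-- ===== SOURCE B (Python) =====
-- from typing import List
--
-- def generate_passwords(words: str) -> List[str]:
--     # Level-by-level expansion: each level holds (remaining words, built string);
--     # strings grow incrementally instead of re-joining a fresh tuple per permutation.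
--     result = []
--     a = words.split()
--     level = [(a, '')]
--     for _ in range(len(a)):
--         next_level = []
--         for rem, s in level:
--             for i in range(len(rem)):
--                 r = rem.copy()
--                 w = r.pop(i)
--                 next_level.append((r, s + w))
--         for _, s in next_level:
--             result.append(s)
--         level = next_level
--     result.sort()
--     return result
-- ===== Notes on version B (the rewrite author's own statement) =====
-- stated objective: alternative
-- what changed: B drops itertools.permutations and the per-length re-enumeration: it grows one level of (remaining-words, built-string) states per round, extending each partial permutation by one word incrementally instead of re-joining a fresh tuple for every sub-permutation of every length.
import Mathlib
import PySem

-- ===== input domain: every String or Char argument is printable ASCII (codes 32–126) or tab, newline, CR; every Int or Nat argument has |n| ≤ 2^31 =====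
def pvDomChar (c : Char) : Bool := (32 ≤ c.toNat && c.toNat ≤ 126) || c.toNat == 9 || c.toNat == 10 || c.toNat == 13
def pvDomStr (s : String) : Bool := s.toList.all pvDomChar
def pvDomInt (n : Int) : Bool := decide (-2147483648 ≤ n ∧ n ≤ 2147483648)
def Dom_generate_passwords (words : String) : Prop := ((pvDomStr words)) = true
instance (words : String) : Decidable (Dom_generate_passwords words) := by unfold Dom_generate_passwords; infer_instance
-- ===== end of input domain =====

-- B replaces the per-length itertools.permutations re-enumeration by a single level-by-level
-- expansion that extends each partial permutation incrementally (objective: alternative).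

-- ===== PORT A =====
def generate_passwords (words : String) : List String :=
  let result : List String := []
  let a := PySem.Str.split₀ words
  let q : Int := (a.length : Int) + 1
  -- j ranges over pyRange 1 q, so j ≥ 1 and j.toNat is exact
  let result := (PySem.List.pyRange 1 q 1).foldl (fun result j =>
      (PySem.List.permutations a j.toNat).foldl
        (fun result item => result ++ [PySem.Str.join "" item]) result) result
  PySem.List.sorted result (fun x => x) false

-- ===== PORT B =====
def generate_passwords_alt (words : String) : List String :=
  let result : List String := []
  let a := PySem.Str.split₀ words
  let level : List (List String × String) := [(a, "")]
  let st := (List.range a.length).foldl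
    (fun (st : List String × List (List String × String)) _ =>
      let next_level := st.2.foldl (fun nl p =>
        (List.range p.1.length).foldl (fun nl (i : Nat) =>
          -- r = rem.copy(); w = r.pop(i): pop? is total via the option match (i < len always holds)
          match PySem.List.pop? p.1 (i : Int) with
          | none => nl
          | some (w, r) => nl ++ [(r, p.2 ++ w)]) nl) []
      let result := next_level.foldl (fun res q => res ++ [q.2]) st.1
      (result, next_level)) (result, level)
  PySem.List.sorted st.1 (fun x => x) false

-- ===== PRECONDITION & SPEC =====
def Spec_generate_passwords (words : String) (out : List String) : Prop := out = generate_passwords_alt words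
instance (words : String) (out : List String) : Decidable (Spec_generate_passwords words out) := by unfold Spec_generate_passwords; infer_instance

-- ===== CLAIM (what is proved, stated in full; the proofs are below) =====
def Claim_equal_generate_passwords : Prop := ∀ (words : String), Dom_generate_passwords words → Spec_generate_passwords words (generate_passwords words)

-- ===== LEMMAS AND PROOFS =====

-- one expansion step of a (remaining words, built string) node
def pvExpand (p : List String × String) : List (List String × String) :=
  (List.range p.1.length).map (fun i => (p.1.eraseIdx i, p.2 ++ p.1[i]!))

-- the level after n expansion steps starting from a single node
def pvL (rem : List String) (s : String) : Nat → List (List String × String)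
  | 0 => [(rem, s)]
  | n + 1 => (pvL rem s n).flatMap pvExpand

lemma pv_pop_eq (xs : List String) (i : Nat) (h : i < xs.length) :
    PySem.List.pop? xs (i : Int) = some (xs[i]!, xs.eraseIdx i) := by
  simp [PySem.List.pop?, PySem.List.pyIdx?, h, getElem!_pos]

lemma pv_join_cons (x : String) (p : List String) :
    PySem.Str.join "" (x :: p) = x ++ PySem.Str.join "" p := by
  have h : ∀ (c : List Char) (q : List (List Char)),
      ([] : List Char).intercalate (c :: q) = c ++ ([] : List Char).intercalate q := by
    intro c q; cases q <;> simp [List.intercalate]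
  simp [PySem.Str.join, PySem.Chars.join, h, String.ofList_append]

lemma pv_join_nil : PySem.Str.join "" ([] : List String) = "" := by
  simp [PySem.Str.join, PySem.Chars.join, List.intercalate]

-- expanding at the last position is the same as branching on the first choice
lemma pvL_succ_head (n : Nat) : ∀ (rem : List String) (s : String),
    pvL rem s (n + 1) =
      (List.range rem.length).flatMap (fun i => pvL (rem.eraseIdx i) (s ++ rem[i]!) n) := by
  induction n with
  | zero =>
      intro rem s
      show ([(rem, s)].flatMap pvExpand) = _
      simp [pvExpand, pvL, List.map_eq_flatMap]
  | succ n ih =>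
      intro rem s
      show (pvL rem s (n + 1)).flatMap pvExpand = _
      rw [ih rem s, List.flatMap_assoc]
      rfl

-- the strings of level n are the joined length-n permutations, prefixed by s, in itertools order
lemma pvL_snd (n : Nat) : ∀ (rem : List String) (s : String),
    (pvL rem s n).map Prod.snd =
      (PySem.List.permutations rem n).map (fun p => s ++ PySem.Str.join "" p) := by
  induction n with
  | zero =>
      intro rem s
      simp [pvL, PySem.List.permutations, pv_join_nil]
  | succ n ih =>
      intro rem s
      rw [pvL_succ_head, PySem.List.permutations_succ, List.map_flatMap, List.map_flatMap]
      apply List.flatMap_congr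
      intro i hi
      have hlt : i < rem.length := List.mem_range.mp hi
      rw [ih]
      simp only [List.getElem?_eq_getElem hlt, List.map_map]
      apply List.map_congr_left
      intro p _
      simp [pv_join_cons, getElem!_pos, hlt, String.append_assoc]

lemma pv_pyRange (n : Nat) : ∀ (a : Int),
    PySem.List.pyRange a (a + n) 1 = (List.range n).map (fun (k : Nat) => a + (k : Int)) := by
  induction n with
  | zero =>
      intro a
      simp [PySem.List.pyRange]
  | succ n ih =>
      intro a
      rw [PySem.List.pyRange_one_cons (by omega)]
      have h : a + ((n + 1 : Nat) : Int) = (a + 1) + (n : Nat) := by push_cast; ring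
      rw [h, ih (a + 1), List.range_succ_eq_map, List.map_cons, List.map_map]
      simp only [Nat.cast_zero, add_zero]
      congr 1
      apply List.map_congr_left
      intro k _
      simp only [Function.comp_apply]
      push_cast; ring

-- the inner loop over the positions of one node produces exactly its expansion
lemma pv_inner (p : List String × String) (nl : List (List String × String)) :
    (List.range p.1.length).foldl (fun nl (i : Nat) =>
        match PySem.List.pop? p.1 (i : Int) with
        | none => nl
        | some (w, r) => nl ++ [(r, p.2 ++ w)]) nl = nl ++ pvExpand p := by
  refine (PySem.List.foldl_congr_mem _ _
      (fun nl i => nl ++ [(p.1.eraseIdx i, p.2 ++ p.1[i]!)]) nl ?_).trans ?_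
  · intro acc i hi
    rw [pv_pop_eq p.1 i (List.mem_range.mp hi)]
  · rw [PySem.List.foldl_append_singleton_eq_map]
    rfl

-- the middle loop over a level builds the whole next level
lemma pv_mid (lvl : List (List String × String)) :
    lvl.foldl (fun nl p =>
        (List.range p.1.length).foldl (fun nl (i : Nat) =>
          match PySem.List.pop? p.1 (i : Int) with
          | none => nl
          | some (w, r) => nl ++ [(r, p.2 ++ w)]) nl) [] = lvl.flatMap pvExpand := by
  refine (PySem.List.foldl_congr_mem _ _ (fun nl p => nl ++ pvExpand p) [] ?_).trans ?_
  · intro acc p _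
    exact pv_inner p acc
  · rw [PySem.List.foldl_append_eq_flatMap]
    rfl

-- loop invariant for port B's fold: after n rounds the result holds the strings of
-- levels 1..n and the state holds level n
lemma pv_loop (a : List String) (n : Nat) :
    (List.range n).foldl
      (fun (st : List String × List (List String × String)) _ =>
        let next_level := st.2.foldl (fun nl p =>
          (List.range p.1.length).foldl (fun nl (i : Nat) =>
            match PySem.List.pop? p.1 (i : Int) with
            | none => nl
            | some (w, r) => nl ++ [(r, p.2 ++ w)]) nl) []
        let result := next_level.foldl (fun res q => res ++ [q.2]) st.1
        (result, next_level)) ([], [(a, "")]) =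
      ((List.range n).flatMap (fun k => (pvL a "" (k + 1)).map Prod.snd), pvL a "" n) := by
  induction n with
  | zero => simp [pvL]
  | succ n ih =>
      rw [List.range_succ, List.foldl_append, List.foldl_cons, List.foldl_nil, ih]
      simp only [pv_mid, PySem.List.foldl_append_singleton_eq_map]
      simp [pvL, List.flatMap_append]

-- ===== VERDICT (by name: the statement is the Claim_ definition above) =====
theorem generate_passwords_spec : Claim_equal_generate_passwords := by
  intro words _
  show generate_passwords words = generate_passwords_alt words
  unfold generate_passwords generate_passwords_alt
  simp only [pv_loop]
  congr 1
  set a := PySem.Str.split₀ words with ha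
  refine ((PySem.List.foldl_congr_mem _ _
      (fun result j => result ++ (PySem.List.permutations a j.toNat).map (PySem.Str.join ""))
      [] ?_).trans ?_)
  · intro acc j _
    rw [PySem.List.foldl_append_singleton_eq_map]
  rw [PySem.List.foldl_append_eq_flatMap, List.nil_append]
  have h1 : ((a.length : Int) + 1) = 1 + ((a.length : Nat) : Int) := by ring
  rw [h1, pv_pyRange a.length 1, List.flatMap_map]
  apply List.flatMap_congr
  intro k _
  have hk : ((1 : Int) + (k : Int)).toNat = k + 1 := by omega
  rw [hk, pvL_snd]
  apply List.map_congr_left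
  intro p _
  simp
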